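-- pv_equiv track=rewrite | github.com/zenkimoto/url_shortener | main.py | biject_string
-- ===== SOURCE A (Python) =====
-- def biject_string(string):
--     result = 0
--
--     while len(string) > 0:
--         ch = string[0]
--
--         if ord('a') <= ord(ch) <= ord('z'):
--             result = result * 62 + ord(ch) - 97
--         elif ord('A') <= ord(ch) <= ord('Z'):
--             result = result * 62 + ord(ch) - 65
--         else:
--             result = result * 62 + ord(ch) - 48
--
--         string = string[1:]
--
--     return result
-- ===== SOURCE B (Python) =====
-- def _digit(ch):
--     if ord('a') <= ord(ch) <= ord('z'):
--         return ord(ch) - 97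
--     elif ord('A') <= ord(ch) <= ord('Z'):
--         return ord(ch) - 65
--     else:
--         return ord(ch) - 48
--
--
-- def biject_string(string):
--     digits = [_digit(ch) for ch in string]
--     powers = []
--     p = 1
--     for _ in digits:
--         powers.append(p)
--         p *= 62
--     return sum(d * w for d, w in zip(digits, reversed(powers)))
-- ===== Notes on version B (the rewrite author's own statement) =====
-- stated objective: alternative
-- what changed: Replaces Horner's single accumulating loop (result = result*62 + value over a repeatedly sliced string) by three staged passes: map characters to digit values, build the list of positional powers of 62 incrementally, and sum the elementwise products of the digits with the reversed power list.
import Mathlib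
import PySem

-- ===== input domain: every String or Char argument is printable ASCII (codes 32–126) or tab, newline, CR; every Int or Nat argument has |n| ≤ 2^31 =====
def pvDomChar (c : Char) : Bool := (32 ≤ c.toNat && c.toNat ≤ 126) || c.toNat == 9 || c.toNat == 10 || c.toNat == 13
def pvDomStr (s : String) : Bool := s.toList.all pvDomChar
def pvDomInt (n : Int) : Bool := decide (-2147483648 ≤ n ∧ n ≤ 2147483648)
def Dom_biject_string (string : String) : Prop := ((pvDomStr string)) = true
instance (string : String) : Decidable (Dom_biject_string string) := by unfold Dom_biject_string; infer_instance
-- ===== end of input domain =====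

-- B replaces Horner's accumulating loop by staged passes: digit values, a positional power list, and a dot product; same per-character mapping.

-- ===== PORT A =====
-- A's while loop consumes the string front-to-back doing result = result*62 + ord(ch) - k: a left fold with the three branches inline.
def biject_string (string : String) : Int :=
  string.toList.foldl (fun result ch =>
    if 97 ≤ ch.toNat ∧ ch.toNat ≤ 122 then result * 62 + (ch.toNat : Int) - 97
    else if 65 ≤ ch.toNat ∧ ch.toNat ≤ 90 then result * 62 + (ch.toNat : Int) - 65
    else result * 62 + (ch.toNat : Int) - 48) 0

-- ===== PORT B =====
-- per-character value (the helper _digit in Source B)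
def pvDigit (c : Char) : Int :=
  if 97 ≤ c.toNat ∧ c.toNat ≤ 122 then (c.toNat : Int) - 97
  else if 65 ≤ c.toNat ∧ c.toNat ≤ 90 then (c.toNat : Int) - 65
  else (c.toNat : Int) - 48

-- Source B's power-building loop: `powers = []; p = 1; for _ in digits: powers.append(p); p *= 62`
def pvPowAcc (acc : List Int) (p : Int) : Nat → List Int
  | 0 => acc
  | k + 1 => pvPowAcc (acc ++ [p]) (p * 62) k

-- Source B: digits pass, powers pass, then sum(d * w for d, w in zip(digits, reversed(powers)))
def biject_string_alt (string : String) : Int :=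
  let digits := string.toList.map pvDigit
  let powers := pvPowAcc [] 1 digits.length
  (List.zipWith (fun d w => d * w) digits powers.reverse).sum

-- ===== PRECONDITION & SPEC =====
def Spec_biject_string (string : String) (out : Int) : Prop := out = biject_string_alt string
instance (string : String) (out : Int) : Decidable (Spec_biject_string string out) := by unfold Spec_biject_string; infer_instance

-- ===== CLAIM (what is proved, stated in full; the proofs are below) =====
def Claim_equal_biject_string : Prop := ∀ (string : String), Dom_biject_string string → Spec_biject_string string (biject_string string)

-- ===== LEMMAS AND PROOFS =====
theorem pv_step_eq :
    (fun (result : Int) (ch : Char) =>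
      if 97 ≤ ch.toNat ∧ ch.toNat ≤ 122 then result * 62 + (ch.toNat : Int) - 97
      else if 65 ≤ ch.toNat ∧ ch.toNat ≤ 90 then result * 62 + (ch.toNat : Int) - 65
      else result * 62 + (ch.toNat : Int) - 48)
    = (fun (result : Int) (ch : Char) => result * 62 + pvDigit ch) := by
  funext r c
  unfold pvDigit
  split_ifs <;> ring

theorem pvPowAcc_spec (k : Nat) (acc : List Int) (p : Int) :
    pvPowAcc acc p k = acc ++ (List.range k).map (fun i => p * 62 ^ i) := by
  induction k generalizing acc p with
  | zero => simp [pvPowAcc]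
  | succ k ih =>
    rw [pvPowAcc, ih, List.range_succ_eq_map]
    simp only [List.map_cons, List.map_map, pow_zero, mul_one, List.append_assoc,
      List.singleton_append]
    refine congrArg _ (congrArg _ (List.map_congr_left ?_))
    intro i _
    simp [Function.comp, pow_succ]
    ring

theorem pv_revPow_succ (n : Nat) :
    (pvPowAcc [] 1 (n + 1)).reverse = (62 : Int) ^ n :: (pvPowAcc [] 1 n).reverse := by
  rw [pvPowAcc_spec, pvPowAcc_spec, List.range_succ]
  simp

theorem pv_horner_eq_dot (l : List Char) (a : Int) :
    l.foldl (fun result ch => result * 62 + pvDigit ch) a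
      = a * 62 ^ l.length +
        (List.zipWith (fun d w => d * w) (l.map pvDigit)
          (pvPowAcc [] 1 (l.map pvDigit).length).reverse).sum := by
  induction l generalizing a with
  | nil => simp [pvPowAcc]
  | cons c t ih =>
    simp only [List.foldl_cons, ih, List.map_cons, List.length_cons, List.length_map]
    rw [pv_revPow_succ, List.zipWith_cons_cons, List.sum_cons]
    ring

-- ===== VERDICT (by name: the statement is the Claim_ definition above) =====
theorem biject_string_spec : Claim_equal_biject_string := by
  intro s _
  unfold Spec_biject_string biject_string biject_string_alt
  rw [pv_step_eq, pv_horner_eq_dot]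
  simp
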